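-- pv_equiv track=rewrite | github.com/workjingmai-lab/nova-os | tools/deprecated/web-lead-extractor.py | match_service_type
-- ===== SOURCE A (Python) =====
-- SERVICE_KEYWORDS = {
--     "monitoring": ["monitoring", "alerts", "incidents", "uptime", "tracking"],
--     "automation": ["automation", "workflow", "pipeline", "integration"],
--     "support": ["support", "customer service", "helpdesk", "tickets"],
--     "governance": ["governance", "voting", "proposal", "dao", "treasury"],
--     "analytics": ["analytics", "data", "dashboard", "reporting", "insights"],
--     "security": ["security", "monitoring", "alerts", "incidents", "breach"]
-- }
--
-- def match_service_type(text: str) -> str: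
--     """Match text to best service type"""
--     text_lower = text.lower()
--     scores = {}
--
--     for service, keywords in SERVICE_KEYWORDS.items():
--         score = sum(1 for kw in keywords if kw in text_lower)
--         if score > 0:
--             scores[service] = score
--
--     if not scores:
--         return "unknown"
--
--     # Return highest scoring service
--     return max(scores, key=scores.get)
-- ===== SOURCE B (Python) =====
-- SERVICE_KEYWORDS = {
--     "monitoring": ["monitoring", "alerts", "incidents", "uptime", "tracking"],
--     "automation": ["automation", "workflow", "pipeline", "integration"],
--     "support": ["support", "customer service", "helpdesk", "tickets"],
--     "governance": ["governance", "voting", "proposal", "dao", "treasury"],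
--     "analytics": ["analytics", "data", "dashboard", "reporting", "insights"],
--     "security": ["security", "monitoring", "alerts", "incidents", "breach"]
-- }
--
-- # Inverted index built once at module load: keyword -> services using it.
-- _INDEX = {}
-- for _service, _kws in SERVICE_KEYWORDS.items():
--     for _kw in _kws:
--         _INDEX.setdefault(_kw, []).append(_service)
--
--
-- def match_service_type(text: str) -> str:
--     """Match text to best service type via an inverted keyword index:
--     each distinct keyword is scanned against the text once, crediting every
--     service that uses it; then the first service (in SERVICE_KEYWORDS order)
--     with the strictly highest count wins."""
--     text_lower = text.lower()
--     counts = {}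
--     for kw, services in _INDEX.items():
--         if kw in text_lower:
--             for s in services:
--                 counts[s] = counts.get(s, 0) + 1
--     best, best_score = "unknown", 0
--     for service in SERVICE_KEYWORDS:
--         score = counts.get(service, 0)
--         if score > best_score:
--             best, best_score = service, score
--     return best
-- ===== Notes on version B (the rewrite author's own statement) =====
-- stated objective: alternative
-- what changed: B transposes the data into an inverted keyword->services index built once, scans each DISTINCT keyword against the text a single time (shared keywords like 'monitoring'/'alerts'/'incidents' are no longer scanned per service), accumulates per-service counts from the index, and picks the first strict maximum in SERVICE_KEYWORDS order; A instead scores service-by-service into a dict and takes max(key=get).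
import Mathlib
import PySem

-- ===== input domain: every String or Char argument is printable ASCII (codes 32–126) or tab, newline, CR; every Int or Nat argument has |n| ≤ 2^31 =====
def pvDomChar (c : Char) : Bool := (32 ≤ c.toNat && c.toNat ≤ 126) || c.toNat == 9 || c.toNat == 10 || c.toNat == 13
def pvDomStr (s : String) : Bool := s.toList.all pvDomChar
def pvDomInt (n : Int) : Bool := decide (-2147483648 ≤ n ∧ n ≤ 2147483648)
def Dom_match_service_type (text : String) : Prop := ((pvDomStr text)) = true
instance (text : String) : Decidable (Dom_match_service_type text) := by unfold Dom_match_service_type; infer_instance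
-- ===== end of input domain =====

-- B transposes A's service-by-service scoring into an inverted keyword->services index:
-- each distinct keyword is scanned once, crediting all services that use it, and the
-- first strict maximum in SERVICE_KEYWORDS order is returned (objective: alternative).

-- the module constant SERVICE_KEYWORDS (a dict literal with distinct keys, as an assoc list)
def pvServiceKeywords : List (String × List String) :=
  [("monitoring", ["monitoring", "alerts", "incidents", "uptime", "tracking"]),
   ("automation", ["automation", "workflow", "pipeline", "integration"]),
   ("support", ["support", "customer service", "helpdesk", "tickets"]),
   ("governance", ["governance", "voting", "proposal", "dao", "treasury"]),
   ("analytics", ["analytics", "data", "dashboard", "reporting", "insights"]),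
   ("security", ["security", "monitoring", "alerts", "incidents", "breach"])]

-- ===== PORT A =====
def match_service_type (text : String) : String :=
  let text_lower := PySem.Str.lower text
  let scores : PySem.Dict String Int :=
    pvServiceKeywords.foldl
      (fun scores p =>
        -- score = sum(1 for kw in keywords if kw in text_lower)
        let score : Int :=
          p.2.foldl (fun acc kw => if PySem.Str.isIn kw text_lower then acc + 1 else acc) 0
        if score > 0 then scores.insert p.1 score else scores)
      PySem.Dict.empty
  if scores.items = [] then "unknown"
  else -- max(scores, key=scores.get): first key with maximal score
    (PySem.List.max? scores.keys (fun k => scores.getD k 0)).getD "unknown"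

-- ===== PORT B =====
-- the module-load inverted index _INDEX (setdefault(kw, []).append(service) ported as
-- insert kw (getD kw [] ++ [service]) — the in-place list append, value-semantically exact)
def pvIndex : PySem.Dict String (List String) :=
  pvServiceKeywords.foldl
    (fun idx p =>
      p.2.foldl (fun idx kw => idx.insert kw (idx.getD kw [] ++ [p.1])) idx)
    PySem.Dict.empty

def match_service_type_alt (text : String) : String :=
  let text_lower := PySem.Str.lower text
  let counts : PySem.Dict String Int :=
    pvIndex.items.foldl
      (fun counts p =>
        if PySem.Str.isIn p.1 text_lower then
          -- for s in services: counts[s] = counts.get(s, 0) + 1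
          p.2.foldl (fun c s => c.insert s (c.getD s 0 + 1)) counts
        else counts)
      PySem.Dict.empty
  let best : String × Int :=
    pvServiceKeywords.foldl
      (fun (best : String × Int) p =>
        let score := counts.getD p.1 0
        if score > best.2 then (p.1, score) else best)
      ("unknown", 0)
  best.1

-- ===== PRECONDITION & SPEC =====
def Spec_match_service_type (text : String) (out : String) : Prop := out = match_service_type_alt text
instance (text : String) (out : String) : Decidable (Spec_match_service_type text out) := by unfold Spec_match_service_type; infer_instance

-- ===== CLAIM (what is proved, stated in full; the proofs are below) =====
def Claim_equal_match_service_type : Prop := ∀ (text : String), Dom_match_service_type text → Spec_match_service_type text (match_service_type text)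

-- ===== LEMMAS AND PROOFS =====

-- A's per-service score, as A computes it
def pvScore (t : String) (kws : List String) : Int :=
  kws.foldl (fun acc kw => if PySem.Str.isIn kw t then acc + 1 else acc) 0

-- the generator-sum count equals a filter length (gives nonnegativity)
theorem pvScore_eq (t : String) (kws : List String) : ∀ (acc : Int),
    kws.foldl (fun acc kw => if PySem.Str.isIn kw t then acc + 1 else acc) acc
      = acc + ((kws.filter (fun kw => PySem.Str.isIn kw t)).length : Int) := by
  induction kws with
  | nil => intro acc; simp
  | cons k ks ih =>
    intro acc
    simp only [List.foldl_cons, List.filter_cons]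
    by_cases h : PySem.Str.isIn k t = true
    · simp only [h, if_true, ih, List.length_cons]
      push_cast; ring
    · simp only [h, if_false, ih, Bool.false_eq_true]

theorem pvScore_nonneg (t : String) (kws : List String) : 0 ≤ pvScore t kws := by
  unfold pvScore; rw [pvScore_eq]; positivity

-- counts.get(s,0) after B's counting loop: each index entry whose keyword is in the
-- text contributes (occurrences of s in its services list) to s's count
theorem pvCounts_getD (t s : String) : ∀ (L : List (String × List String)) (d : PySem.Dict String Int),
    (L.foldl
      (fun counts p =>
        if PySem.Str.isIn p.1 t then
          p.2.foldl (fun c w => c.insert w (c.getD w 0 + 1)) counts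
        else counts) d).getD s 0
      = d.getD s 0
        + (L.map (fun p => if PySem.Str.isIn p.1 t then ((p.2.count s : Nat) : Int) else 0)).sum := by
  intro L
  induction L with
  | nil => intro d; simp
  | cons p L ih =>
    intro d
    simp only [List.foldl_cons, List.map_cons, List.sum_cons]
    by_cases h : PySem.Str.isIn p.1 t = true
    · rw [if_pos h, if_pos h, ih, PySem.Dict.getD_foldl_insert_add_one]
      ring
    · rw [if_neg h, if_neg h, ih]
      ring

-- the running-best fold with a key function g equals the same fold over (name, score)
-- pairs when g agrees with the score on every listed name
theorem pvBestCongr (g : String → Int) (sc : List String → Int) :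
    ∀ (L : List (String × List String)) (acc : String × Int), (∀ p ∈ L, g p.1 = sc p.2) →
    L.foldl (fun (best : String × Int) p =>
        if g p.1 > best.2 then (p.1, g p.1) else best) acc
      = (L.map (fun p => (p.1, sc p.2))).foldl
          (fun (best : String × Int) p => if p.2 > best.2 then (p.1, p.2) else best) acc := by
  intro L
  induction L with
  | nil => intro acc _; rfl
  | cons p L ih =>
    intro acc h
    have hp : g p.1 = sc p.2 := h p (by simp)
    simp only [List.foldl_cons, List.map_cons, hp]
    exact ih _ (fun q hq => h q (List.mem_cons_of_mem _ hq))

-- the first-max fold step (the fold inside PySem.List.max?)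
def pvStepMax {α : Type} (key : α → Int) (acc : Option α) (x : α) : Option α :=
  match acc with
  | none => some x
  | some m => if key m < key x then some x else some m

-- the dict built by A's loop over fresh, distinct keys holds exactly the positive-score entries
theorem pvItems_fold (l : List (String × Int)) :
    ∀ (d : PySem.Dict String Int), (∀ p ∈ l, d.contains p.1 = false) → (l.map Prod.fst).Nodup →
    (l.foldl (fun d (p : String × Int) => if p.2 > 0 then d.insert p.1 p.2 else d) d).items
      = d.items ++ l.filter (fun p => decide (0 < p.2)) := by
  induction l with
  | nil => intro d _ _; simp
  | cons p l ih =>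
    intro d hfresh hnodup
    have hp : d.contains p.1 = false := hfresh p (by simp)
    have hnd : (l.map Prod.fst).Nodup := (List.nodup_cons.mp hnodup).2
    have hne : ∀ q ∈ l, q.1 ≠ p.1 := by
      intro q hq hEq
      exact (List.nodup_cons.mp hnodup).1 (hEq ▸ List.mem_map_of_mem hq)
    simp only [List.foldl_cons, List.filter_cons]
    by_cases hpos : p.2 > 0
    · have hfresh' : ∀ q ∈ l, (d.insert p.1 p.2).contains q.1 = false := by
        intro q hq
        rw [PySem.Dict.contains_insert]
        simp [hne q hq, hfresh q (List.mem_cons_of_mem _ hq)]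
      rw [if_pos hpos, ih _ hfresh' hnd, PySem.Dict.items_insert_of_not_contains d p.2 hp]
      simp [hpos]
    · rw [if_neg hpos, ih d (fun q hq => hfresh q (List.mem_cons_of_mem _ hq)) hnd]
      simp [hpos]

-- the first-max fold over mapped keys is the map of the first-max fold
theorem pvMaxMap (g : String → Int) (xs : List (String × Int)) :
    ∀ (acc : Option (String × Int)),
    (xs.map Prod.fst).foldl (pvStepMax g) (acc.map Prod.fst)
      = (xs.foldl (pvStepMax (fun p => g p.1)) acc).map Prod.fst := by
  induction xs with
  | nil => intro acc; rfl
  | cons x xs ih =>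
    intro acc
    cases acc with
    | none => exact ih (some x)
    | some m =>
      simp only [List.map_cons, List.foldl_cons, Option.map_some, pvStepMax]
      by_cases hc : g m.1 < g x.1 <;> simp only [hc, if_true, if_false]
      · exact ih (some x)
      · exact ih (some m)

-- key-function congruence for the first-max fold, on list members and the accumulator
theorem pvMaxCongr (k1 k2 : String × Int → Int) (xs : List (String × Int)) :
    ∀ (acc : Option (String × Int)), (∀ p ∈ xs, k1 p = k2 p) → (∀ m, acc = some m → k1 m = k2 m) →
    xs.foldl (pvStepMax k1) acc = xs.foldl (pvStepMax k2) acc := by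
  induction xs with
  | nil => intro acc _ _; rfl
  | cons x xs ih =>
    intro acc hl hacc
    have hx : k1 x = k2 x := hl x (by simp)
    have hl' : ∀ p ∈ xs, k1 p = k2 p := fun p hp => hl p (List.mem_cons_of_mem _ hp)
    cases acc with
    | none =>
      simp only [List.foldl_cons]
      exact ih (some x) hl' (fun q hq => by cases hq; exact hx)
    | some m =>
      have hm : k1 m = k2 m := hacc m rfl
      simp only [List.foldl_cons, pvStepMax, hx, hm]
      by_cases h : k2 m < k2 x <;> simp only [h, if_true, if_false]
      · exact ih (some x) hl' (fun q hq => by cases hq; exact hx)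
      · exact ih (some m) hl' (fun q hq => by cases hq; exact hm)

-- the first-max fold of a nonempty list (or a some accumulator) is some
theorem pvMaxSome (key : String × Int → Int) (xs : List (String × Int)) :
    ∀ (acc : Option (String × Int)), xs ≠ [] ∨ acc.isSome →
    (xs.foldl (pvStepMax key) acc).isSome := by
  induction xs with
  | nil =>
    intro acc h
    rcases h with h | h
    · exact absurd rfl h
    · exact h
  | cons x xs ih =>
    intro acc _
    cases acc with
    | none => exact ih (some x) (Or.inr rfl)
    | some m =>
      simp only [List.foldl_cons, pvStepMax]
      by_cases hc : key m < key x <;> simp only [hc, if_true, if_false]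
      · exact ih (some x) (Or.inr rfl)
      · exact ih (some m) (Or.inr rfl)

-- encode B's running-best state as an optional (service, score) pair
def pvEnc (o : Option (String × Int)) : String × Int :=
  match o with
  | none => ("unknown", 0)
  | some p => (p.1, p.2)

-- B's running best = the first-max fold over the positive-score entries
theorem pvBFold (l : List (String × Int)) :
    ∀ (o : Option (String × Int)), (∀ p ∈ l, 0 ≤ p.2) → (∀ m, o = some m → 0 < m.2) →
    l.foldl (fun (best : String × Int) p => if p.2 > best.2 then (p.1, p.2) else best) (pvEnc o)
      = pvEnc ((l.filter (fun p => decide (0 < p.2))).foldl (pvStepMax (fun p => p.2)) o) := by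
  induction l with
  | nil => intro o _ _; rfl
  | cons p l ih =>
    intro o hnn ho
    have hnn' : ∀ q ∈ l, 0 ≤ q.2 := fun q hq => hnn q (List.mem_cons_of_mem _ hq)
    simp only [List.foldl_cons, List.filter_cons]
    by_cases hpos : 0 < p.2
    · simp only [hpos, decide_true, if_true, List.foldl_cons]
      cases o with
      | none =>
        rw [show (if p.2 > (pvEnc none).2 then (p.1, p.2) else pvEnc none) = pvEnc (some p)
          from by simp [pvEnc, hpos]]
        rw [ih (some p) hnn' (fun q hq => by cases hq; exact hpos)]
        rfl
      | some m =>
        have hm : 0 < m.2 := ho m rfl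
        by_cases hc : m.2 < p.2
        · rw [show (if p.2 > (pvEnc (some m)).2 then (p.1, p.2) else pvEnc (some m)) = pvEnc (some p)
            from by simp [pvEnc, hc]]
          rw [show pvStepMax (fun p : String × Int => p.2) (some m) p = some p
            from by simp [pvStepMax, hc]]
          exact ih (some p) hnn' (fun q hq => by cases hq; exact hpos)
        · rw [show (if p.2 > (pvEnc (some m)).2 then (p.1, p.2) else pvEnc (some m)) = pvEnc (some m)
            from by simp [pvEnc, hc]]
          rw [show pvStepMax (fun p : String × Int => p.2) (some m) p = some m
            from by simp [pvStepMax, hc]]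
          exact ih (some m) hnn' ho
    · simp only [hpos, decide_false, if_false, Bool.false_eq_true]
      have hle : p.2 ≤ 0 := le_of_not_gt hpos
      cases o with
      | none =>
        rw [show (if p.2 > (pvEnc none).2 then (p.1, p.2) else pvEnc none) = pvEnc none
          from by simp [pvEnc]; omega]
        exact ih none hnn' (by simp)
      | some m =>
        have hm : 0 < m.2 := ho m rfl
        rw [show (if p.2 > (pvEnc (some m)).2 then (p.1, p.2) else pvEnc (some m)) = pvEnc (some m)
          from by simp [pvEnc]; omega]
        exact ih (some m) hnn' ho

-- master equivalence on an abstract (name, score) list with distinct names and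
-- nonnegative scores: A's dict-then-first-max equals the running best
theorem pvMaster (l : List (String × Int))
    (hnn : ∀ p ∈ l, 0 ≤ p.2) (hnd : (l.map Prod.fst).Nodup) :
    (let scores := l.foldl (fun d (p : String × Int) => if p.2 > 0 then d.insert p.1 p.2 else d) PySem.Dict.empty
     if scores.items = [] then "unknown"
     else (PySem.List.max? scores.keys (fun k => scores.getD k 0)).getD "unknown")
    = (l.foldl (fun (best : String × Int) p => if p.2 > best.2 then (p.1, p.2) else best) ("unknown", 0)).1 := by
  have hfresh : ∀ p ∈ l, (PySem.Dict.empty : PySem.Dict String Int).contains p.1 = false := by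
    intro p _; simp [PySem.Dict.contains, PySem.Dict.empty]
  set lp := l.filter (fun p => decide (0 < p.2)) with hlp
  set scores := l.foldl (fun d (p : String × Int) => if p.2 > 0 then d.insert p.1 p.2 else d) PySem.Dict.empty with hscores
  have hitems' : scores.items = lp := by
    simpa [PySem.Dict.empty] using pvItems_fold l PySem.Dict.empty hfresh hnd
  have hB : l.foldl (fun (best : String × Int) p => if p.2 > best.2 then (p.1, p.2) else best) ("unknown", 0)
      = pvEnc (lp.foldl (pvStepMax (fun p => p.2)) none) := by
    simpa [pvEnc] using pvBFold l none hnn (by simp)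
  have hkeys : scores.keys = lp.map Prod.fst := by
    simp [PySem.Dict.keys, hitems']
  have hknd : (lp.map Prod.fst).Nodup := hnd.sublist (List.Sublist.map Prod.fst List.filter_sublist)
  have hgetD : ∀ p ∈ lp, scores.getD p.1 0 = p.2 := by
    intro p hp
    have hmem : (p.1, p.2) ∈ scores.items := by rw [hitems']; exact hp
    have hkn : scores.keys.Nodup := by rw [hkeys]; exact hknd
    exact PySem.Dict.getD_of_get?_eq_some scores 0
      (PySem.Dict.get?_of_mem_items scores hmem hkn)
  have hmax : PySem.List.max? scores.keys (fun k => scores.getD k 0)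
      = (lp.foldl (pvStepMax (fun p => p.2)) none).map Prod.fst := by
    have h1 : PySem.List.max? scores.keys (fun k => scores.getD k 0)
        = (lp.map Prod.fst).foldl (pvStepMax (fun k => scores.getD k 0)) none := by
      rw [hkeys]; rfl
    rw [h1]
    have h2 := pvMaxMap (fun k => scores.getD k 0) lp none
    simp only [Option.map_none] at h2
    rw [h2, pvMaxCongr (fun p => scores.getD p.1 0) (fun p => p.2) lp none hgetD (by simp)]
  by_cases hnil : scores.items = []
  · have hlpnil : lp = [] := by rw [← hitems']; exact hnil
    simp only [hnil, if_true]
    rw [hB, hlpnil]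
    rfl
  · simp only [hnil, if_false]
    have hlpne : lp ≠ [] := by rw [← hitems']; exact hnil
    obtain ⟨m, hm⟩ := Option.isSome_iff_exists.mp (pvMaxSome (fun p => p.2) lp none (Or.inl hlpne))
    rw [hB, hm, hmax, hm]
    rfl

-- the inverted index, evaluated (it is a closed constant)
theorem pvIndex_items : pvIndex.items =
    [("monitoring", ["monitoring", "security"]), ("alerts", ["monitoring", "security"]),
     ("incidents", ["monitoring", "security"]), ("uptime", ["monitoring"]),
     ("tracking", ["monitoring"]), ("automation", ["automation"]),
     ("workflow", ["automation"]), ("pipeline", ["automation"]),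
     ("integration", ["automation"]), ("support", ["support"]),
     ("customer service", ["support"]), ("helpdesk", ["support"]),
     ("tickets", ["support"]), ("governance", ["governance"]),
     ("voting", ["governance"]), ("proposal", ["governance"]),
     ("dao", ["governance"]), ("treasury", ["governance"]),
     ("analytics", ["analytics"]), ("data", ["analytics"]),
     ("dashboard", ["analytics"]), ("reporting", ["analytics"]),
     ("insights", ["analytics"]), ("security", ["security"]),
     ("breach", ["security"])] := by decide

-- B's counts agree with A's per-service scores on every service name
theorem pvCounts_eq_score (t : String) : ∀ p ∈ pvServiceKeywords,
    (pvIndex.items.foldl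
      (fun counts q =>
        if PySem.Str.isIn q.1 t then
          q.2.foldl (fun c w => c.insert w (c.getD w 0 + 1)) counts
        else counts) PySem.Dict.empty).getD p.1 0 = pvScore t p.2 := by
  intro p hp
  rw [pvCounts_getD, pvIndex_items, PySem.Dict.getD_empty]
  fin_cases hp <;>
    simp only [pvScore, List.map_cons, List.map_nil, List.sum_cons, List.sum_nil,
      List.foldl_cons, List.foldl_nil, List.count_cons, List.count_nil] <;>
    norm_num <;> split_ifs <;> omega

-- ===== VERDICT (by name: the statement is the Claim_ definition above) =====
theorem match_service_type_spec : Claim_equal_match_service_type := by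
  intro text _
  unfold Spec_match_service_type match_service_type match_service_type_alt
  set t := PySem.Str.lower text with ht
  have hmain := pvMaster (pvServiceKeywords.map (fun p => (p.1, pvScore t p.2)))
    (by intro p hp; simp only [List.mem_map] at hp; obtain ⟨q, _, rfl⟩ := hp; exact pvScore_nonneg t q.2)
    (by simp [pvServiceKeywords])
  simp only [List.foldl_map] at hmain
  set C : PySem.Dict String Int := (pvIndex.items.foldl
      (fun counts q =>
        if PySem.Str.isIn q.1 t then
          q.2.foldl (fun c w => c.insert w (c.getD w 0 + 1)) counts
        else counts) PySem.Dict.empty) with hC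
  have hcs := pvCounts_eq_score t
  rw [← hC] at hcs
  have hbest := pvBestCongr (fun k => C.getD k 0) (pvScore t) pvServiceKeywords ("unknown", 0) hcs
  simp only [List.foldl_map] at hbest
  exact hmain.trans (congrArg Prod.fst hbest.symm)
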